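-- pv_equiv track=rewrite | github.com/sinnrrr/interview-preparations | amazon/purchase_items_test.py | solution
-- ===== SOURCE A (Python) =====
-- def solution(a: list[int], b: list[int], m: int):
--     prices = {i: a[i] for i in range(len(a))}
--
--     def purchase_item(i: int):
--         temp = prices[i]
--         prices[i] += b[i]
--         return temp
--
--     total_cost = 0
--     while m > 0:
--         lowest_value_item_idx = min(prices, key=prices.get)
--         total_cost += purchase_item(lowest_value_item_idx)
--         m -= 1
--
--     return total_cost
-- ===== SOURCE B (Python) =====
-- def _insert(items, x):
--     # insert x into the sorted list `items` before the first element greater than x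
--     for k in range(len(items)):
--         if x < items[k]:
--             return items[:k] + [x] + items[k:]
--     return items + [x]
--
--
-- def solution(a, b, m):
--     # maintained sorted list of (price, index): the cheapest item is always items[0]
--     items = []
--     for i, p in enumerate(a):
--         items = _insert(items, (p, i))
--     total = 0
--     while m > 0:
--         p, i = items[0]
--         items = _insert(items[1:], (p + b[i], i))
--         total += p
--         m -= 1
--     return total
-- ===== Notes on version B (the rewrite author's own statement) =====
-- stated objective: alternative
-- what changed: A rescans the whole dict with min(prices, key=prices.get) on every purchase; B instead maintains a list of (price, index) pairs kept sorted, takes the cheapest item from the front in O(1) and re-inserts it at its new sorted position.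
-- outside the precondition, e.g. on solution([1, 5], [1], 1): A returns 1, B returns 1
import Mathlib
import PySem

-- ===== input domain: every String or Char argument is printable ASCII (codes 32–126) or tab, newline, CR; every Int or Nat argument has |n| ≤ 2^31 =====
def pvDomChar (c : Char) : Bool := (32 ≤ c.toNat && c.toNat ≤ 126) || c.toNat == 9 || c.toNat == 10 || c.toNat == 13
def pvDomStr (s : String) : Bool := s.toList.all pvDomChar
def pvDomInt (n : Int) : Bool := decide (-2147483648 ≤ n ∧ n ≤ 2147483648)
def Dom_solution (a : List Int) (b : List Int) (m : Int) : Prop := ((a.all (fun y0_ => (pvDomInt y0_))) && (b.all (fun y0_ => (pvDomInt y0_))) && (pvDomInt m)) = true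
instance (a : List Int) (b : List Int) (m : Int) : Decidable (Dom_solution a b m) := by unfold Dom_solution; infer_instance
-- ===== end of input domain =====

-- B replaces A's per-purchase rescan of the dict by a maintained sorted list of (price, index)
-- pairs (pop the front, re-insert at the new position): an alternative algorithm of similar cost.

-- ===== PORT A =====
-- `min(prices, key=prices.get)` together with its value: scan the dict items in insertion
-- order, keeping the first pair whose value is strictly smaller (Python's `min` keeps the first).
def solMinItem (h : Int × Int) (t : List (Int × Int)) : Int × Int :=
  t.foldl (fun best kv => if kv.2 < best.2 then kv else best) h

-- the `while m > 0:` loop, fuel = m.toNat; an empty dict (Python: `min` raises ValueError)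
-- is excluded by Pre_solution, as is any b[i] access out of range (IndexError), so pyGetD is exact.
def solLoop (b : List Int) : PySem.Dict Int Int → Nat → Int → Int
  | _, 0, tc => tc
  | d, k + 1, tc =>
    match d.items with
    | [] => tc
    | h :: t =>
      let best := solMinItem h t
      solLoop b (d.insert best.1 (best.2 + PySem.List.pyGetD b best.1 0)) k (tc + best.2)

def solution (a : List Int) (b : List Int) (m : Int) : Int :=
  let prices := (PySem.List.pyRange 0 (PySem.List.len a) 1).foldl
    (fun d i => d.insert i (PySem.List.pyGetD a i 0)) PySem.Dict.empty
  solLoop b prices m.toNat 0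

-- ===== PORT B =====
-- Python's `<` on (price, index) tuples: lexicographic.
def pairLt (p q : Int × Int) : Bool := p.1 < q.1 || (p.1 == q.1 && p.2 < q.2)

-- `_insert`: put x before the first element greater than x.
def insSorted (items : List (Int × Int)) (x : Int × Int) : List (Int × Int) :=
  match items with
  | [] => [x]
  | h :: t => if pairLt x h then x :: h :: t else h :: insSorted t x

-- the `while m > 0:` loop of B; `items[0]` on [] (IndexError) is excluded by Pre_solution.
def altLoop (b : List Int) : List (Int × Int) → Nat → Int → Int
  | _, 0, tc => tc
  | [], _ + 1, tc => tc
  | (p, i) :: t, k + 1, tc =>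
      altLoop b (insSorted t (p + PySem.List.pyGetD b i 0, i)) k (tc + p)

def solution_alt (a : List Int) (b : List Int) (m : Int) : Int :=
  let items := (PySem.List.enumerate a 0).foldl (fun acc pi => insSorted acc (pi.2, pi.1)) []
  altLoop b items m.toNat 0

-- ===== PRECONDITION & SPEC =====
-- Pre_ excludes (i) m > 0 with a = [], where Python's min() raises ValueError, and
-- (ii) m > 0 with len(a) > len(b), the malformed shape: which b[i] are read depends on the
-- purchase sequence, so A may raise IndexError there or happen to return (B behaves the same
-- either way — the exclusion is by shape, slightly wider than the raising inputs).
def Pre_solution (a : List Int) (b : List Int) (m : Int) : Prop :=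
  0 < m → (a ≠ [] ∧ a.length ≤ b.length)
instance (a : List Int) (b : List Int) (m : Int) : Decidable (Pre_solution a b m) := by
  unfold Pre_solution; infer_instance

def pvWitness_solution : List Int × List Int × Int := ([3, 1, 2], [1, 1, 1], 4)

def Spec_solution (a : List Int) (b : List Int) (m : Int) (out : Int) : Prop := out = solution_alt a b m
instance (a : List Int) (b : List Int) (m : Int) (out : Int) : Decidable (Spec_solution a b m out) := by unfold Spec_solution; infer_instance

-- ===== CLAIM (what is proved, stated in full; the proofs are below) =====
def Claim_equal_solution : Prop := ∀ (a : List Int) (b : List Int) (m : Int), Dom_solution a b m → Pre_solution a b m → Spec_solution a b m (solution a b m)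

-- ===== LEMMAS AND PROOFS =====

theorem pairLt_irrefl (p : Int × Int) : pairLt p p = false := by
  simp [pairLt]

theorem pairLt_trans {p q r : Int × Int} (h1 : pairLt p q = true) (h2 : pairLt q r = true) :
    pairLt p r = true := by
  simp [pairLt] at *; omega

theorem pairLt_false_cases {p q : Int × Int} (h : pairLt q p = false) :
    pairLt p q = true ∨ p = q := by
  obtain ⟨p1, p2⟩ := p; obtain ⟨q1, q2⟩ := q
  simp [pairLt, Prod.ext_iff] at *; omega

theorem pairLt_of_not_lt {p q : Int × Int} (h : pairLt p q = false) (hne : p.2 ≠ q.2) :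
    pairLt q p = true := by
  rcases pairLt_false_cases h with h' | h'
  · exact h'
  · exact absurd (congrArg Prod.snd h').symm hne

-- first strict minimum w.r.t. pairLt, as a fold
def bmin (x : Int × Int) (s : List (Int × Int)) : Int × Int :=
  s.foldl (fun acc y => if pairLt y acc then y else acc) x

theorem bmin_mem : ∀ (s : List (Int × Int)) (x : Int × Int), bmin x s ∈ x :: s := by
  intro s
  induction s with
  | nil => intro x; simp [bmin]
  | cons y s' ih =>
    intro x
    show bmin (if pairLt y x then y else x) s' ∈ x :: y :: s'
    rcases List.mem_cons.mp (ih (if pairLt y x then y else x)) with h | h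
    · rw [h]; split <;> simp
    · simp [h]

theorem bmin_min : ∀ (s : List (Int × Int)) (x : Int × Int), ∀ z ∈ x :: s, pairLt z (bmin x s) = false := by
  intro s
  induction s with
  | nil =>
    intro x z hz
    rcases List.mem_cons.mp hz with rfl | hz
    · simpa [bmin] using pairLt_irrefl z
    · simp at hz
  | cons y s' ih =>
    intro x z hz
    show pairLt z (bmin (if pairLt y x then y else x) s') = false
    by_cases hyx : pairLt y x = true
    · rw [if_pos hyx]
      rcases List.mem_cons.mp hz with rfl | hz'
      · -- z = x
        by_contra hc
        have h1 : pairLt z (bmin y s') = true := by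
          revert hc; cases pairLt z (bmin y s') <;> simp
        have h2 : pairLt y (bmin y s') = true := pairLt_trans hyx h1
        rw [ih y y (by simp)] at h2
        simp at h2
      · exact ih y z hz'
    · rw [if_neg hyx]
      have hyx' : pairLt y x = false := by
        revert hyx; cases pairLt y x <;> simp
      rcases List.mem_cons.mp hz with rfl | hz'
      · exact ih z z (by simp)
      · rcases List.mem_cons.mp hz' with rfl | hz''
        · -- z = y, and ¬ (y < x)
          by_contra hc
          have h1 : pairLt z (bmin x s') = true := by
            revert hc; cases pairLt z (bmin x s') <;> simp
          rcases pairLt_false_cases hyx' with hxy | heq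
          · have h2 : pairLt x (bmin x s') = true := pairLt_trans hxy h1
            rw [ih x x (by simp)] at h2
            simp at h2
          · rw [← heq] at h1
            rw [ih x x (by simp)] at h1
            simp at h1
        · exact ih x z (by simp [hz''])

theorem solMinItem_eq_bmin :
    ∀ (t : List (Int × Int)) (h : Int × Int),
      (∀ q ∈ t, h.1 < q.1) → t.Pairwise (fun p q => p.1 < q.1) →
      solMinItem h t = Prod.swap (bmin (Prod.swap h) (t.map Prod.swap)) := by
  intro t
  induction t with
  | nil => intro h _ _; simp [solMinItem, bmin]
  | cons kv t' ih =>
    intro h hlt hpw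
    have hkey : h.1 < kv.1 := hlt kv (by simp)
    rw [List.pairwise_cons] at hpw
    have step1 : solMinItem h (kv :: t') = solMinItem (if kv.2 < h.2 then kv else h) t' := rfl
    have step2 : bmin (Prod.swap h) ((kv :: t').map Prod.swap)
        = bmin (if pairLt (Prod.swap kv) (Prod.swap h) then Prod.swap kv else Prod.swap h) (t'.map Prod.swap) := rfl
    have hcond : pairLt (Prod.swap kv) (Prod.swap h) = decide (kv.2 < h.2) := by
      by_cases hc : kv.2 < h.2
      · simp [pairLt, Prod.swap, hc]
      · simp [pairLt, Prod.swap, hc]; omega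
    rw [step1, step2, hcond]
    by_cases hc : kv.2 < h.2
    · rw [if_pos (by simpa using hc), if_pos (by simpa using hc)]
      exact ih kv (fun q hq => hpw.1 q hq) hpw.2
    · rw [if_neg (by simpa using hc), if_neg (by simpa using hc)]
      exact ih h (fun q hq => hlt q (by simp [hq])) hpw.2

theorem mem_insSorted {l : List (Int × Int)} {x y : Int × Int} :
    y ∈ insSorted l x ↔ y = x ∨ y ∈ l := by
  induction l with
  | nil => simp [insSorted]
  | cons h t ih =>
    simp only [insSorted]
    split
    · simp only [List.mem_cons]
    · simp only [List.mem_cons, ih]; tauto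

theorem insSorted_perm (l : List (Int × Int)) (x : Int × Int) :
    (insSorted l x).Perm (x :: l) := by
  induction l with
  | nil => simp [insSorted]
  | cons h t ih =>
    simp only [insSorted]
    split
    · exact List.Perm.refl _
    · exact (ih.cons h).trans (List.Perm.swap x h t)

theorem insSorted_pairwise {l : List (Int × Int)} {x : Int × Int}
    (hl : l.Pairwise (fun p q => pairLt p q = true)) (hx : ∀ y ∈ l, y.2 ≠ x.2) :
    (insSorted l x).Pairwise (fun p q => pairLt p q = true) := by
  induction l with
  | nil => simp [insSorted]
  | cons h t ih =>
    rw [List.pairwise_cons] at hl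
    simp only [insSorted]
    split
    · rename_i hxh
      refine List.pairwise_cons.mpr ⟨?_, List.pairwise_cons.mpr ⟨hl.1, hl.2⟩⟩
      intro z hz
      rcases List.mem_cons.mp hz with rfl | hz
      · exact hxh
      · exact pairLt_trans hxh (hl.1 z hz)
    · rename_i hxh
      have hxh' : pairLt x h = false := by
        revert hxh; cases pairLt x h <;> simp
      have hhx : pairLt h x = true :=
        pairLt_of_not_lt hxh' (fun he => hx h (by simp) he.symm)
      refine List.pairwise_cons.mpr ⟨?_, ih hl.2 (fun y hy => hx y (by simp [hy]))⟩
      intro z hz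
      rcases mem_insSorted.mp hz with rfl | hz
      · exact hhx
      · exact hl.1 z hz

-- the main loop invariant: A's dict items have strictly increasing keys, B's list is
-- strictly pairLt-sorted, and B's list is a permutation of the swapped items.
theorem loop_eq (b : List Int) :
    ∀ (k : Nat) (d : PySem.Dict Int Int) (L : List (Int × Int)) (tc : Int),
      d.items.Pairwise (fun p q => p.1 < q.1) →
      L.Pairwise (fun p q => pairLt p q = true) →
      (d.items.map Prod.swap).Perm L →
      solLoop b d k tc = altLoop b L k tc := by
  intro k
  induction k with
  | zero => intro d L tc _ _ _; rfl
  | succ k ih =>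
    intro d L tc hpw hs hperm
    cases hI : d.items with
    | nil =>
      have hL : L = [] := by
        have := hperm; rw [hI] at this; exact this.nil_eq.symm
      show (match d.items with
            | [] => tc
            | h :: t =>
              let best := solMinItem h t
              solLoop b (d.insert best.1 (best.2 + PySem.List.pyGetD b best.1 0)) k (tc + best.2))
          = altLoop b L (k + 1) tc
      rw [hI, hL]; rfl
    | cons h t =>
      rw [hI] at hperm
      cases hLc : L with
      | nil => rw [hLc] at hperm; exact absurd hperm.symm.nil_eq (by simp)
      | cons x Lt =>
        obtain ⟨v, i⟩ := x
        rw [hLc] at hperm hs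
        rw [hI] at hpw
        have hpw' := List.pairwise_cons.mp hpw
        -- the head of B's sorted list is the (swapped) first minimum of A's scan
        have hzmem := bmin_mem (t.map Prod.swap) (Prod.swap h)
        have hzmin := bmin_min (t.map Prod.swap) (Prod.swap h)
        set z := bmin (Prod.swap h) (t.map Prod.swap) with hzdef
        have hzL : z ∈ (v, i) :: Lt := hperm.mem_iff.mp (by simpa using hzmem)
        have hviM : (v, i) ∈ (h :: t).map Prod.swap := hperm.symm.mem_iff.mp (by simp)
        have hz : z = (v, i) := by
          rcases List.mem_cons.mp hzL with hz0 | hzLt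
          · exact hz0
          · exfalso
            have h1 : pairLt (v, i) z = true := (List.pairwise_cons.mp hs).1 z hzLt
            have h2 : pairLt (v, i) z = false := hzmin (v, i) (by simpa using hviM)
            rw [h1] at h2; exact absurd h2 (by simp)
        have hmin : solMinItem h t = (i, v) := by
          rw [solMinItem_eq_bmin t h hpw'.1 hpw'.2, ← hzdef, hz]; rfl
        -- facts about keys
        have hnd : ((h :: t).map Prod.fst).Nodup :=
          (List.pairwise_map.mpr hpw).imp (fun hlt => ne_of_lt hlt)
        have hsndM : ((h :: t).map Prod.swap).map Prod.snd = (h :: t).map Prod.fst := by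
          simp [List.map_map, Function.comp]
        have hndL : (((v, i) :: Lt).map Prod.snd).Nodup := by
          refine (hperm.map Prod.snd).nodup ?_
          rw [hsndM]; exact hnd
        have hLtsnd : ∀ y ∈ Lt, y.2 ≠ i := by
          intro y hy he
          rw [List.map_cons, List.nodup_cons] at hndL
          exact hndL.1 (List.mem_map.mpr ⟨y, hy, he⟩)
        -- A's dict contains key i
        have hiv_items : (i, v) ∈ d.items := by
          rw [hI]
          rcases List.mem_map.mp hviM with ⟨p, hp, hps⟩
          have : p = (i, v) := by
            obtain ⟨p1, p2⟩ := p
            simp [Prod.swap, Prod.ext_iff] at hps ⊢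
            exact ⟨hps.2, hps.1⟩
          rwa [← this]
        have hcont : d.contains i = true := by
          rw [PySem.Dict.contains_iff_mem_keys]
          show i ∈ d.keys
          have hm : i ∈ d.items.map Prod.fst := List.mem_map.mpr ⟨(i, v), hiv_items, rfl⟩
          simpa [PySem.Dict.keys] using hm
        -- unfold one step on both sides
        have hstepA : solLoop b d (k + 1) tc
            = solLoop b (d.insert i (v + PySem.List.pyGetD b i 0)) k (tc + v) := by
          show (match d.items with
                | [] => tc
                | h :: t =>
                  let best := solMinItem h t
                  solLoop b (d.insert best.1 (best.2 + PySem.List.pyGetD b best.1 0)) k (tc + best.2))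
              = _
          rw [hI]
          simp only [hmin]
        have hstepB : altLoop b ((v, i) :: Lt) (k + 1) tc
            = altLoop b (insSorted Lt (v + PySem.List.pyGetD b i 0, i)) k (tc + v) := rfl
        rw [hstepA, hstepB]
        -- the new states are again related
        have hitems' : (d.insert i (v + PySem.List.pyGetD b i 0)).items
            = d.items.map (fun p => if p.1 == i then (i, v + PySem.List.pyGetD b i 0) else p) :=
          PySem.Dict.items_insert_of_contains d _ hcont
        have hfst : ∀ p : Int × Int, ((fun p => if p.1 == i then (i, v + PySem.List.pyGetD b i 0) else p) p).1 = p.1 := by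
          intro p; by_cases hp : p.1 = i <;> simp [hp]
        refine ih (d.insert i (v + PySem.List.pyGetD b i 0)) (insSorted Lt (v + PySem.List.pyGetD b i 0, i)) (tc + v) ?_ ?_ ?_
        · rw [hitems', hI]
          refine List.pairwise_map.mpr ?_
          refine hpw.imp ?_
          intro p q hlt
          rw [hfst p, hfst q]; exact hlt
        · exact insSorted_pairwise (List.pairwise_cons.mp hs).2
            (fun y hy => hLtsnd y hy)
        · rw [hitems', hI]
          have hswap : ((h :: t).map (fun p => if p.1 == i then (i, v + PySem.List.pyGetD b i 0) else p)).map Prod.swap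
              = ((h :: t).map Prod.swap).map (fun y => if y.2 == i then (v + PySem.List.pyGetD b i 0, i) else y) := by
            simp only [List.map_map]
            refine List.map_congr_left ?_
            intro p _
            by_cases hp : p.1 = i <;> simp [Function.comp, hp]
          rw [hswap]
          have h1 : (((h :: t).map Prod.swap).map (fun y => if y.2 == i then (v + PySem.List.pyGetD b i 0, i) else y)).Perm
              (((v, i) :: Lt).map (fun y => if y.2 == i then (v + PySem.List.pyGetD b i 0, i) else y)) :=
            hperm.map _
          have h2 : ((v, i) :: Lt).map (fun y => if y.2 == i then (v + PySem.List.pyGetD b i 0, i) else y)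
              = (v + PySem.List.pyGetD b i 0, i) :: Lt := by
            rw [List.map_cons]
            congr 1
            · simp
            · have h3 := List.map_congr_left (l := Lt)
                (f := fun y : Int × Int => if (y.2 == i) = true then (v + PySem.List.pyGetD b i 0, i) else y)
                (g := id) (fun y hy => by simp [hLtsnd y hy])
              simpa using h3
          rw [h2] at h1
          exact h1.trans (insSorted_perm Lt (v + PySem.List.pyGetD b i 0, i)).symm

-- initial state of B: folding insSorted is a permutation of the swapped input
theorem foldl_ins_perm :
    ∀ (l : List (Int × Int)) (acc : List (Int × Int)),
      (l.foldl (fun acc pi => insSorted acc (pi.2, pi.1)) acc).Perm (acc ++ l.map Prod.swap) := by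
  intro l
  induction l with
  | nil => intro acc; simp
  | cons p l' ih =>
    intro acc
    refine (ih (insSorted acc (p.2, p.1))).trans ?_
    have h1 : (insSorted acc (p.2, p.1)).Perm ((p.2, p.1) :: acc) := insSorted_perm acc _
    refine ((h1.append_right (l'.map Prod.swap)).trans ?_)
    show ((p.2, p.1) :: (acc ++ l'.map Prod.swap)).Perm (acc ++ (p.2, p.1) :: l'.map Prod.swap)
    exact List.perm_middle.symm

theorem foldl_ins_pairwise :
    ∀ (l : List (Int × Int)) (acc : List (Int × Int)),
      acc.Pairwise (fun p q => pairLt p q = true) →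
      (∀ y ∈ acc, ∀ p ∈ l, y.2 ≠ p.1) →
      (l.map Prod.fst).Nodup →
      (l.foldl (fun acc pi => insSorted acc (pi.2, pi.1)) acc).Pairwise (fun p q => pairLt p q = true) := by
  intro l
  induction l with
  | nil => intro acc h _ _; exact h
  | cons p l' ih =>
    intro acc hacc hdisj hnd
    rw [List.map_cons, List.nodup_cons] at hnd
    refine ih (insSorted acc (p.2, p.1)) ?_ ?_ hnd.2
    · exact insSorted_pairwise hacc (fun y hy => hdisj y hy p (by simp))
    · intro y hy q hq
      rcases mem_insSorted.mp hy with rfl | hy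
      · show p.1 ≠ q.1
        intro he; exact hnd.1 (he ▸ List.mem_map_of_mem hq)
      · exact hdisj y hy q (by simp [hq])

-- initial state of A: the dict comprehension over range(len(a)) is exactly enumerate(a)
theorem items_init (a : List Int) :
    ((PySem.List.pyRange 0 (PySem.List.len a) 1).foldl
      (fun d i => d.insert i (PySem.List.pyGetD a i 0)) PySem.Dict.empty).items
    = PySem.List.enumerate a 0 := by
  have h := PySem.Dict.items_foldl_insert_fresh (PySem.List.pyRange 0 (PySem.List.len a) 1)
      (fun i => i) (fun i => PySem.List.pyGetD a i 0) PySem.Dict.empty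
      (fun x _ => PySem.Dict.contains_empty x)
      (by simpa using PySem.List.nodup_pyRange_one 0 (PySem.List.len a))
  rw [PySem.List.enumerate_eq_map_pyRange (d := 0)]
  simpa using h

-- ===== VERDICT (by name: the statement is the Claim_ definition above) =====
theorem solution_spec : Claim_equal_solution := by
  intro a b m _ _
  unfold Spec_solution solution solution_alt
  refine loop_eq b m.toNat _ _ 0 ?_ ?_ ?_
  · rw [items_init, PySem.List.enumerate_eq_map_pyRange (d := 0)]
    refine List.pairwise_map.mpr ?_
    refine (PySem.List.pairwise_lt_pyRange_one 0 (PySem.List.len a)).imp ?_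
    intro i j h; exact h
  · refine foldl_ins_pairwise _ [] (by simp) (by simp) ?_
    rw [PySem.List.map_fst_enumerate]
    exact PySem.List.nodup_pyRange_one _ _
  · rw [items_init]
    exact (foldl_ins_perm (PySem.List.enumerate a 0) []).symm
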